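-- pv_equiv track=rewrite | github.com/MrBrantCode/unitest_baseline | mut_generate/mist_train_cf/cf_20547/solution.py | multiply_by_next_prime
-- ===== SOURCE A (Python) =====
-- def multiply_by_next_prime(arr):
--     def is_prime(n):
--         if n <= 1:
--             return False
--         for i in range(2, int(n ** 0.5) + 1):
--             if n % i == 0:
--                 return False
--         return True
--
--     def next_prime(n):
--         while True:
--             n += 1
--             if is_prime(n):
--                 return n
--
--     prime = 5  # Start with the smallest prime greater than 3
--     result = []
--     for num in arr:
--         if num % prime == 0:
--             prime = next_prime(prime)
--         result.append(num * prime)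
--     return result
-- ===== SOURCE B (Python) =====
-- def multiply_by_next_prime(arr):
--     # Sieve of Eratosthenes prime table, grown lazily (doubling the limit)
--     # whenever the walking index runs off its end.
--
--     def sieve_primes(limit):
--         flags = [True] * (limit + 1)
--         flags[0] = flags[1] = False
--         for i in range(2, limit + 1):
--             for m in range(2, limit // i + 1):
--                 flags[m * i] = False
--         return [k for k in range(limit + 1) if flags[k]]
--
--     limit = 16
--     primes = sieve_primes(limit)
--
--     idx = 2  # primes[2] == 5
--     result = []
--     for num in arr:
--         if num % primes[idx] == 0:
--             idx += 1
--             while len(primes) <= idx: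
--                 limit *= 2
--                 primes = sieve_primes(limit)
--         result.append(num * primes[idx])
--     return result
-- ===== Notes on version B (the rewrite author's own statement) =====
-- stated objective: alternative
-- what changed: Replaces A's interleaved trial-division next_prime search with a precomputed Sieve of Eratosthenes prime table: the table (all primes up to a limit, the limit doubled lazily whenever the walking index runs off the table's end) is walked by an index during a single pass, so no per-element trial division or primality test happens in the pass.
import Mathlib
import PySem

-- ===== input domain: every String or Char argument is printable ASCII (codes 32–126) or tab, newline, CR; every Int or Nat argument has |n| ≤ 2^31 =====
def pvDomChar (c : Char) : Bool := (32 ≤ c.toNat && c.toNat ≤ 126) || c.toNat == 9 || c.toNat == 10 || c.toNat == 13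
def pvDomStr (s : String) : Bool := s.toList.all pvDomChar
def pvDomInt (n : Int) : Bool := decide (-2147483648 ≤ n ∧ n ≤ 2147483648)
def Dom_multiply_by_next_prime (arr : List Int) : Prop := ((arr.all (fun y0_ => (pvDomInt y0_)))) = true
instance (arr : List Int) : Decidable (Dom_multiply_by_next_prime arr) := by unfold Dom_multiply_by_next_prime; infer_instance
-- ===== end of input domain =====

-- ===== PORT A =====
-- One honest line: B replaces A's interleaved trial-division next_prime search with a
-- Sieve-of-Eratosthenes prime table (grown by doubling when the index runs off its end)
-- walked by an index during a single pass; same outputs.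
-- Note: A's `int(n ** 0.5)` is ported as the exact integer square root, which agrees with the
-- float computation for every magnitude reachable here.

def isPrimeA (n : Int) : Bool :=
  if n ≤ 1 then false
  else (PySem.List.pyRange 2 ((n.toNat.sqrt : Int) + 1) 1).all (fun i => !(PySem.Int.mod n i == 0))

-- `while True: n += 1; if is_prime(n): return n`, made total with fuel (the caller passes enough
-- fuel; Bertrand's postulate shows the 0-fuel branch is never reached).
def nextPrimeA : Nat → Int → Int
  | 0, n => n + 1
  | fuel + 1, n => if isPrimeA (n + 1) then n + 1 else nextPrimeA fuel (n + 1)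

def goA : List Int → Int → List Int → List Int
  | [], _, result => result
  | num :: rest, prime, result =>
    if PySem.Int.mod num prime == 0 then
      let p := nextPrimeA prime.toNat prime
      goA rest p (result ++ [num * p])
    else
      goA rest prime (result ++ [num * prime])

def multiply_by_next_prime (arr : List Int) : List Int := goA arr 5 []

-- ===== PORT B =====
-- Stage 1 of Source B: the sieve.  `flags = [True]*(limit+1); flags[0]=flags[1]=False;`
-- `for i in range(2, limit+1): for m in range(2, limit//i + 1): flags[m*i] = False`.
-- All range bounds are nonnegative, so the ranges are ported as Nat ranges (exact).
def sieveFlags (limit : Nat) : List Bool :=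
  (List.range' 2 (limit - 1)).foldl
    (fun fs i => (List.range' 2 (limit / i - 1)).foldl (fun fs' m => fs'.set (m * i) false) fs)
    (((List.replicate (limit + 1) true).set 0 false).set 1 false)

-- `[k for k in range(limit+1) if flags[k]]` (index k is always in range)
def primesOf (limit : Nat) : List Nat :=
  (List.range (limit + 1)).filter (fun k => (sieveFlags limit).getD k false)

-- the `while len(primes) <= idx:` doubling loop, made total with fuel (the caller passes
-- enough fuel; Bertrand's postulate shows the 0-fuel branch is never reached)
def growB (need : Nat) : Nat → Nat → List Nat → Nat × List Nat
  | 0, limit, primes => (limit, primes)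
  | fuel + 1, limit, primes =>
    if primes.length < need then
      growB need fuel (limit * 2) (primesOf (limit * 2))
    else (limit, primes)

-- the table-indexed pass (the index is proved in range, so `getD _ _ 0` returns
-- exactly Python's `primes[idx]`)
def passB : List Int → Nat → List Nat → Nat → List Int → List Int
  | [], _, _, _, result => result
  | num :: rest, limit, primes, idx, result =>
    if PySem.Int.mod num ((primes.getD idx 0 : Nat) : Int) == 0 then
      let lp := growB (idx + 2) (idx + 3) limit primes
      passB rest lp.1 lp.2 (idx + 1) (result ++ [num * ((lp.2.getD (idx + 1) 0 : Nat) : Int)])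
    else
      passB rest limit primes idx (result ++ [num * ((primes.getD idx 0 : Nat) : Int)])

def multiply_by_next_prime_alt (arr : List Int) : List Int :=
  passB arr 16 (primesOf 16) 2 []

-- ===== PRECONDITION & SPEC =====
def Spec_multiply_by_next_prime (arr : List Int) (out : List Int) : Prop := out = multiply_by_next_prime_alt arr
instance (arr : List Int) (out : List Int) : Decidable (Spec_multiply_by_next_prime arr out) := by unfold Spec_multiply_by_next_prime; infer_instance

-- ===== CLAIM (what is proved, stated in full; the proofs are below) =====
def Claim_equal_multiply_by_next_prime : Prop := ∀ (arr : List Int), Dom_multiply_by_next_prime arr → Spec_multiply_by_next_prime arr (multiply_by_next_prime arr)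

-- ===== LEMMAS AND PROOFS =====

-- the least prime strictly greater than n
theorem lpa_ex (n : Nat) : ∃ p, n < p ∧ Nat.Prime p := by
  obtain ⟨p, hle, hp⟩ := Nat.exists_infinite_primes (n + 1); exact ⟨p, by omega, hp⟩

def lpa (n : Nat) : Nat := Nat.find (lpa_ex n)

-- reference walk both ports are reduced to
def goR : List Int → Nat → List Int
  | [], _ => []
  | num :: rest, P =>
    if PySem.Int.mod num (P : Int) == 0 then
      (num * (lpa P : Int)) :: goR rest (lpa P)
    else
      (num * (P : Int)) :: goR rest P

theorem lpa_lt (n : Nat) : n < lpa n := (Nat.find_spec (lpa_ex n)).1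
theorem lpa_prime (n : Nat) : Nat.Prime (lpa n) := (Nat.find_spec (lpa_ex n)).2
theorem lpa_min {n p : Nat} (h1 : n < p) (h2 : Nat.Prime p) : lpa n ≤ p :=
  Nat.find_le (h := lpa_ex n) ⟨h1, h2⟩
theorem lpa_le_two_mul {n : Nat} (hn : n ≠ 0) : lpa n ≤ 2 * n := by
  obtain ⟨p, hp, h1, h2⟩ := Nat.bertrand n hn
  exact le_trans (lpa_min h1 hp) h2
theorem not_prime_between {n m : Nat} (h1 : n < m) (h2 : m < lpa n) : ¬ Nat.Prime m := by
  intro hp; exact absurd (lpa_min h1 hp) (by omega)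

-- A's primality test decides Nat.Prime for n ≥ 2
theorem isPrimeA_eq (N : Nat) (h : 2 ≤ N) : isPrimeA (N : Int) = decide (Nat.Prime N) := by
  have hnot : ¬ ((N : Int) ≤ 1) := by omega
  have htn : ((N : Int)).toNat = N := Int.toNat_natCast N
  rw [isPrimeA, if_neg hnot, htn, Bool.eq_iff_iff]
  simp only [List.all_eq_true, PySem.List.mem_pyRange_one, Bool.not_eq_eq_eq_not, Bool.not_true,
    beq_eq_false_iff_ne, ne_eq, decide_eq_true_eq]
  constructor
  · intro hall
    rw [Nat.prime_def_le_sqrt]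
    refine ⟨h, fun m hm2 hms hdvd => ?_⟩
    refine hall (m : Int) ⟨by exact_mod_cast hm2, by omega⟩ ?_
    exact (PySem.Int.mod_eq_zero_iff_dvd _ _).2 (by exact_mod_cast hdvd)
  · rintro hp i ⟨hi2, his⟩ hmod
    have hdvd : i ∣ (N : Int) := (PySem.Int.mod_eq_zero_iff_dvd _ _).1 hmod
    have hi0 : 0 ≤ i := by omega
    lift i to Nat using hi0 with m
    rw [Nat.prime_def_le_sqrt] at hp
    exact hp.2 m (by exact_mod_cast hi2) (by omega) (by exact_mod_cast hdvd)

-- A's search computes lpa, given enough fuel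
theorem nextPrimeA_eq : ∀ (fuel N : Nat), 1 ≤ N → lpa N ≤ N + fuel →
    nextPrimeA fuel (N : Int) = (lpa N : Int) := by
  intro fuel
  induction fuel with
  | zero => intro N _ h; exact absurd h (by have := lpa_lt N; omega)
  | succ f ih =>
    intro N h1 h
    have hcast : (N : Int) + 1 = ((N + 1 : Nat) : Int) := by omega
    rw [nextPrimeA, hcast, isPrimeA_eq (N + 1) (by omega)]
    by_cases hp : lpa N = N + 1
    · rw [if_pos (by rw [decide_eq_true_eq]; rw [← hp]; exact lpa_prime N), hp]
    · have hlt : N + 1 < lpa N := by have := lpa_lt N; omega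
      rw [if_neg (by simp only [decide_eq_true_eq]; exact not_prime_between (by omega) hlt)]
      have hsucc : lpa (N + 1) = lpa N := by
        have h1' : lpa (N + 1) ≤ lpa N := lpa_min hlt (lpa_prime N)
        have h2' : lpa N ≤ lpa (N + 1) := lpa_min (by have := lpa_lt (N + 1); omega) (lpa_prime (N + 1))
        omega
      rw [ih (N + 1) (by omega) (by rw [hsucc]; omega), hsucc]

theorem goA_eq : ∀ (arr : List Int) (P : Nat) (acc : List Int), Nat.Prime P → 5 ≤ P →
    goA arr (P : Int) acc = acc ++ goR arr P := by
  intro arr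
  induction arr with
  | nil => intro P acc _ _; simp [goA, goR]
  | cons num rest ih =>
    intro P acc hP h5
    rw [goA, goR]
    by_cases hmod : PySem.Int.mod num (P : Int) == 0
    · rw [if_pos hmod, if_pos hmod]
      have htn : ((P : Int)).toNat = P := Int.toNat_natCast P
      have hnp : nextPrimeA ((P : Int)).toNat (P : Int) = ((lpa P : Nat) : Int) := by
        rw [htn]
        exact nextPrimeA_eq P P (by omega) (by have := lpa_le_two_mul (n := P) (by omega); omega)
      rw [hnp, ih (lpa P) _ (lpa_prime P) (by have := lpa_lt P; omega)]
      simp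
    · rw [if_neg hmod, if_neg hmod, ih P _ hP h5]
      simp

-- ===== B-side lemmas =====

-- all primes up to L, in increasing order
def npl (L : Nat) : List Nat := (List.range (L + 1)).filter (fun k => decide (Nat.Prime k))

theorem mem_npl {L k : Nat} : k ∈ npl L ↔ k ≤ L ∧ Nat.Prime k := by
  rw [npl, List.mem_filter, List.mem_range]
  simp

theorem npl_pairwise (L : Nat) : (npl L).Pairwise (· < ·) :=
  List.Pairwise.sublist List.filter_sublist List.pairwise_lt_range

-- folding `set · false` over a list of indices
theorem foldl_set_getElem? : ∀ (js : List Nat) (fs : List Bool) (k : Nat),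
    (js.foldl (fun a j => a.set j false) fs)[k]? =
      if k ∈ js ∧ k < fs.length then some false else fs[k]? := by
  intro js
  induction js with
  | nil => intro fs k; simp
  | cons j js ih =>
    intro fs k
    rw [List.foldl_cons, ih, List.length_set]
    by_cases hmem : k ∈ js ∧ k < fs.length
    · rw [if_pos hmem, if_pos ⟨List.mem_cons_of_mem _ hmem.1, hmem.2⟩]
    · rw [if_neg hmem]
      by_cases hkj : k = j
      · subst hkj
        by_cases hlen : k < fs.length
        · rw [if_pos ⟨List.mem_cons_self .., hlen⟩]
          simp [hlen]
        · rw [if_neg (by tauto)]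
          rw [List.getElem?_set]
          simp [hlen]
      · rw [if_neg (by rintro ⟨h1, h2⟩; rcases List.mem_cons.1 h1 with h | h; exact hkj h; exact hmem ⟨h, h2⟩)]
        rw [List.getElem?_set, if_neg (fun h => hkj h.symm)]

-- the sieve: entry k is `decide (Nat.Prime k)` for every k ≤ limit
theorem sieveFlags_getElem? (limit k : Nat) (hlim : 2 ≤ limit) (hk : k ≤ limit) :
    (sieveFlags limit)[k]? = some (decide (Nat.Prime k)) := by
  -- characterise the outer fold
  have hlen0 : (((List.replicate (limit + 1) true).set 0 false).set 1 false).length = limit + 1 := by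
    simp
  have houter : ∀ (is : List Nat) (fs : List Bool), fs.length = limit + 1 →
      ((is.foldl (fun fs i => (List.range' 2 (limit / i - 1)).foldl
          (fun fs' m => fs'.set (m * i) false) fs) fs))[k]? =
        if (∃ i ∈ is, k ∈ (List.range' 2 (limit / i - 1)).map (· * i)) then some false else fs[k]? := by
    intro is
    induction is with
    | nil => intro fs _; simp
    | cons i is ih =>
      intro fs hfs
      rw [List.foldl_cons]
      have hinner : ((List.range' 2 (limit / i - 1)).foldl
          (fun fs' m => fs'.set (m * i) false) fs)
          = (((List.range' 2 (limit / i - 1)).map (· * i)).foldl (fun a j => a.set j false) fs) := by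
        rw [List.foldl_map]
      have hlen : ((List.range' 2 (limit / i - 1)).foldl
          (fun fs' m => fs'.set (m * i) false) fs).length = limit + 1 := by
        rw [hinner]
        have hgen : ∀ (js : List Nat) (gs : List Bool),
            (js.foldl (fun a j => a.set j false) gs).length = gs.length := by
          intro js
          induction js with
          | nil => intro gs; rfl
          | cons j js ihj => intro gs; rw [List.foldl_cons, ihj, List.length_set]
        rw [hgen, hfs]
      rw [ih _ hlen]
      by_cases hrest : ∃ i' ∈ is, k ∈ (List.range' 2 (limit / i' - 1)).map (· * i')
      · rw [if_pos hrest, if_pos (by obtain ⟨i', h1, h2⟩ := hrest; exact ⟨i', List.mem_cons_of_mem _ h1, h2⟩)]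
      · rw [if_neg hrest, hinner, foldl_set_getElem?, hfs]
        by_cases hcur : k ∈ (List.range' 2 (limit / i - 1)).map (· * i)
        · rw [if_pos ⟨hcur, by omega⟩, if_pos ⟨i, List.mem_cons_self .., hcur⟩]
        · rw [if_neg (by tauto),
            if_neg (by rintro ⟨i', hi', hex⟩; rcases List.mem_cons.1 hi' with rfl | h
                       · exact hcur hex
                       · exact hrest ⟨i', h, hex⟩)]
  have hmemmap : ∀ i : Nat, (k ∈ (List.range' 2 (limit / i - 1)).map (· * i)) ↔
      ∃ m, 2 ≤ m ∧ m ≤ limit / i ∧ k = m * i := by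
    intro i
    simp only [List.mem_map, List.mem_range'_1]
    constructor
    · rintro ⟨m, ⟨hm1, hm2⟩, rfl⟩; exact ⟨m, hm1, by omega, rfl⟩
    · rintro ⟨m, hm1, hm2, rfl⟩; exact ⟨m, ⟨hm1, by omega⟩, rfl⟩
  rw [sieveFlags, houter _ _ hlen0]
  -- the cleared set is exactly the composites ≥ 4
  have hcond : (∃ i ∈ List.range' 2 (limit - 1), k ∈ (List.range' 2 (limit / i - 1)).map (· * i)) ↔
      (2 ≤ k ∧ ¬ Nat.Prime k) := by
    constructor
    · rintro ⟨i, hi, hk'⟩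
      obtain ⟨m, hm2, hmd, rfl⟩ := (hmemmap i).1 hk'
      rw [List.mem_range'_1] at hi
      have hik : i < m * i := by nlinarith
      refine ⟨by nlinarith, fun hp => ?_⟩
      rcases (Nat.Prime.eq_one_or_self_of_dvd hp i ⟨m, by ring⟩) with h | h <;> omega
    · rintro ⟨hk2, hnp⟩
      obtain ⟨i, hdvd, hi2, hilt⟩ := Nat.exists_dvd_of_not_prime2 hk2 hnp
      obtain ⟨m, rfl⟩ := hdvd
      have hm2 : 2 ≤ m := by
        rcases Nat.lt_or_ge m 2 with h | h
        · interval_cases m <;> omega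
        · exact h
      have hile : i ≤ limit := by nlinarith
      refine ⟨i, List.mem_range'_1.2 ⟨hi2, by omega⟩, (hmemmap i).2 ⟨m, hm2, ?_, by ring⟩⟩
      exact Nat.le_div_iff_mul_le (by omega) |>.2 (by nlinarith)
  by_cases hc : 2 ≤ k ∧ ¬ Nat.Prime k
  · rw [if_pos (hcond.2 hc)]
    have : ¬ Nat.Prime k := hc.2
    simp [this]
  · rw [if_neg (by rw [hcond]; exact hc)]
    have hklen : k < (((List.replicate (limit + 1) true).set 0 false).set 1 false).length := by omega
    rcases Nat.lt_or_ge k 2 with h2 | h2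
    · interval_cases k <;>
        simp [List.getElem?_set, Nat.not_prime_zero, Nat.not_prime_one]; omega
    · have hp : Nat.Prime k := by tauto
      rw [List.getElem?_set, if_neg (by omega), List.getElem?_set, if_neg (by omega),
        List.getElem?_replicate_of_lt (by omega)]
      simp [hp]

theorem primesOf_eq (limit : Nat) (hlim : 2 ≤ limit) : primesOf limit = npl limit := by
  rw [primesOf, npl]
  refine List.filter_congr ?_
  intro k hk
  rw [List.mem_range] at hk
  rw [List.getD_eq_getElem?_getD, sieveFlags_getElem? limit k hlim (by omega)]
  rfl

-- π grows strictly under doubling (Bertrand)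
theorem npl_double (L : Nat) (hL : 1 ≤ L) : (npl L).length + 1 ≤ (npl (2 * L)).length := by
  have hsplit : List.range (2 * L + 1) = List.range (L + 1) ++ (List.range L).map (fun t => L + 1 + t) := by
    have : 2 * L + 1 = (L + 1) + L := by omega
    rw [this, List.range_add]
  have : npl (2 * L) = npl L ++ ((List.range L).map (fun t => L + 1 + t)).filter (fun k => decide (Nat.Prime k)) := by
    rw [npl, npl, hsplit, List.filter_append]
  rw [this, List.length_append]
  obtain ⟨p, hp, h1, h2⟩ := Nat.bertrand L (by omega)
  have hpmem : p ∈ ((List.range L).map (fun t => L + 1 + t)).filter (fun k => decide (Nat.Prime k)) := by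
    rw [List.mem_filter]
    refine ⟨List.mem_map.2 ⟨p - L - 1, List.mem_range.2 (by omega), by omega⟩, by simpa using hp⟩
  have := List.length_pos_of_mem hpmem
  omega

-- the prime table for a larger limit extends the smaller one
theorem npl_prefix {L L' : Nat} (h : L ≤ L') : ∃ t, npl L' = npl L ++ t := by
  refine ⟨((List.range (L' - L)).map (fun t => L + 1 + t)).filter (fun k => decide (Nat.Prime k)), ?_⟩
  have hsplit : List.range (L' + 1) = List.range (L + 1) ++ (List.range (L' - L)).map (fun t => L + 1 + t) := by
    have : L' + 1 = (L + 1) + (L' - L) := by omega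
    rw [this, List.range_add]
  rw [npl, npl, hsplit, List.filter_append]

theorem npl_getElem_prefix {L L' idx : Nat} (h : L ≤ L') (hidx : idx < (npl L).length) :
    (npl L')[idx]'(by obtain ⟨t, ht⟩ := npl_prefix h; rw [ht, List.length_append]; omega)
      = (npl L)[idx]'hidx := by
  obtain ⟨t, ht⟩ := npl_prefix h
  rw [List.getElem_of_eq ht _, List.getElem_append_left hidx]

-- the doubling loop returns a complete prime table of length ≥ need
theorem growB_eq (need : Nat) : ∀ (fuel L : Nat), 16 ≤ L →
    need ≤ (npl L).length + fuel →
    ∃ L', 16 ≤ L' ∧ L ≤ L' ∧ growB need fuel L (npl L) = (L', npl L') ∧ need ≤ (npl L').length := by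
  intro fuel
  induction fuel with
  | zero =>
    intro L h16 hf
    exact ⟨L, h16, le_refl L, rfl, by omega⟩
  | succ f ih =>
    intro L h16 hf
    rw [growB]
    by_cases hlt : (npl L).length < need
    · rw [if_pos hlt]
      have hdouble := npl_double L (by omega)
      have h2L : L * 2 = 2 * L := by omega
      rw [primesOf_eq _ (by omega), h2L]
      obtain ⟨L', a, b, c, d⟩ := ih (2 * L) (by omega) (by omega)
      exact ⟨L', a, by omega, c, d⟩
    · rw [if_neg hlt]
      exact ⟨L, h16, le_refl L, rfl, by omega⟩

-- consecutive table entries: the successor of entry idx is its next prime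
theorem npl_getElem_succ (L idx : Nat) (h : idx + 1 < (npl L).length) :
    (npl L)[idx + 1] = lpa ((npl L)[idx]'(by omega)) := by
  have hpair := npl_pairwise L
  rw [List.pairwise_iff_getElem] at hpair
  have hq : (npl L)[idx + 1] ∈ npl L := List.getElem_mem _
  have hpm : (npl L)[idx]'(by omega) ∈ npl L := List.getElem_mem _
  obtain ⟨hqL, hqp⟩ := mem_npl.1 hq
  obtain ⟨hpL, hpp⟩ := mem_npl.1 hpm
  have hlt : (npl L)[idx]'(by omega) < (npl L)[idx + 1] := hpair idx (idx + 1) (by omega) h (by omega)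
  have hge : lpa ((npl L)[idx]'(by omega)) ≤ (npl L)[idx + 1] := lpa_min hlt hqp
  have hmem : lpa ((npl L)[idx]'(by omega)) ∈ npl L := mem_npl.2 ⟨by omega, lpa_prime _⟩
  obtain ⟨j, hj, hje⟩ := List.getElem_of_mem hmem
  have hjgt : idx < j := by
    by_contra hle
    rcases Nat.eq_or_lt_of_le (Nat.le_of_not_lt hle) with rfl | hlt2
    · have := lpa_lt ((npl L)[j]'hj); omega
    · have h3 := hpair j idx (by omega) (by omega) hlt2
      have := lpa_lt ((npl L)[idx]'(by omega)); omega
  have hle2 : (npl L)[idx + 1] ≤ (npl L)[j]'hj := by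
    rcases Nat.eq_or_lt_of_le hjgt with h1 | h1
    · subst h1; exact Nat.le_refl _
    · exact Nat.le_of_lt (hpair (idx + 1) j (by omega) hj h1)
  exact Nat.le_antisymm (hje ▸ hle2) hge

-- the table-walking pass equals the reference walk
theorem passB_eq : ∀ (arr : List Int) (L idx : Nat) (acc : List Int)
    (h16 : 16 ≤ L) (hlen : idx < (npl L).length),
    passB arr L (npl L) idx acc = acc ++ goR arr ((npl L)[idx]'hlen) := by
  intro arr
  induction arr with
  | nil => intro L idx acc _ _; simp [passB, goR]
  | cons num rest ih =>
    intro L idx acc h16 hlen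
    have hgd : (npl L).getD idx 0 = (npl L)[idx]'hlen := List.getD_eq_getElem _ _ hlen
    rw [passB, goR, hgd]
    by_cases hmod : PySem.Int.mod num (((npl L)[idx]'hlen : Nat) : Int) == 0
    · rw [if_pos hmod, if_pos hmod]
      obtain ⟨L', h16', hLL', hgrow, hlen'⟩ :=
        growB_eq (idx + 2) (idx + 3) L h16 (by omega)
      simp only [hgrow]
      have hidx1 : idx + 1 < (npl L').length := by omega
      have hgd1 : (npl L').getD (idx + 1) 0 = (npl L')[idx + 1]'hidx1 :=
        List.getD_eq_getElem _ _ hidx1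
      have hsucc : (npl L')[idx + 1]'hidx1 = lpa ((npl L)[idx]'hlen) := by
        rw [npl_getElem_succ L' idx hidx1, npl_getElem_prefix hLL' hlen]
      rw [hgd1, ih L' (idx + 1) _ h16' hidx1, hsucc]
      simp
    · rw [if_neg hmod, if_neg hmod, ih L idx _ h16 hlen]
      simp

-- ===== VERDICT (by name: the statement is the Claim_ definition above) =====
theorem multiply_by_next_prime_spec : Claim_equal_multiply_by_next_prime := by
  intro arr _
  unfold Spec_multiply_by_next_prime multiply_by_next_prime multiply_by_next_prime_alt
  have h5 : Nat.Prime 5 := by decide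
  have hA := goA_eq arr 5 [] h5 (le_refl 5)
  have hlen : 2 < (npl 16).length := by decide
  have hB := passB_eq arr 16 2 [] (le_refl 16) hlen
  have h2 : (npl 16)[2]'hlen = 5 := by
    have hgd : (npl 16).getD 2 0 = 5 := by decide
    rwa [List.getD_eq_getElem _ _ hlen] at hgd
  rw [primesOf_eq 16 (by omega), hB, h2]
  simp only [Nat.cast_ofNat] at hA
  rw [hA]
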